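-- pv_equiv track=rewrite | github.com/OpenBlatam/AI-Models-Clone | robot_movement_ai/frontend/web-mirror-tools/scripts/validate_legal.py | _extract_user_agent_section
-- ===== SOURCE A (Python) =====
-- from typing import Optional, Tuple
--
-- def _extract_user_agent_section(content: str, user_agent: str) -> Optional[str]:
--     """Extrae la sección de un user agent específico"""
--     lines = content.split('\n')
--     in_section = False
--     section = []
--
--     for line in lines:
--         if line.strip().startswith('User-agent:'):
--             in_section = user_agent in line or '*' in line
--             if in_section:
--                 section = []
--         if in_section:
--             section.append(line)
--
--     return '\n'.join(section) if section else None
-- ===== SOURCE B (Python) =====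
-- def _extract_user_agent_section(content, user_agent):
--     """Extrae la sección de un user agent específico"""
--     blocks = []
--     cur = []
--     for line in content.split('\n'):
--         if line.strip().startswith('User-agent:'):
--             blocks.append(cur)
--             cur = [line]
--         else:
--             cur.append(line)
--     blocks.append(cur)
--     result = None
--     for b in blocks:
--         if b and b[0].strip().startswith('User-agent:') and (user_agent in b[0] or '*' in b[0]):
--             result = '\n'.join(b)
--     return result
-- ===== Notes on version B (the rewrite author's own statement) =====
-- stated objective: alternative
-- what changed: B partitions the lines into blocks (each User-agent line starts a new block) and then selects the last block whose head line matches, instead of A's single pass with a running in_section flag that resets the accumulator.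
import Mathlib
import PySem

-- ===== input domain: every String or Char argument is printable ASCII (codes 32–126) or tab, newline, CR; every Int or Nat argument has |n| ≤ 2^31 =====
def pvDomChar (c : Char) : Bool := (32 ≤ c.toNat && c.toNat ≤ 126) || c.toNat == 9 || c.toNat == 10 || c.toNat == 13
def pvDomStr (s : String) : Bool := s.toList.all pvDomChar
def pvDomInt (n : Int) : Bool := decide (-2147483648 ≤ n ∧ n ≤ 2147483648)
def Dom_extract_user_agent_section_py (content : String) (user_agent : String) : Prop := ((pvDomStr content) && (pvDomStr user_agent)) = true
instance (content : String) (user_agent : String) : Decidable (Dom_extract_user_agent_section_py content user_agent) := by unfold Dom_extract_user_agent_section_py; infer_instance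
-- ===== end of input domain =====

-- B groups the lines into blocks started by User-agent lines and selects the last matching block,
-- instead of A's single pass with a running in_section flag and a reset accumulator (alternative decomposition, same cost).

-- content.split('\n')  ('\n' is a nonempty separator, so split? always returns some)
def pvLines (content : String) : List String :=
  (PySem.Str.split? content "\n").getD []

-- line.strip().startswith('User-agent:')
def pvIsUA (line : String) : Bool :=
  PySem.Str.startswith (PySem.Str.strip line) "User-agent:"

-- user_agent in line or '*' in line
def pvMatches (line : String) (user_agent : String) : Bool :=
  PySem.Str.isIn user_agent line || PySem.Str.isIn "*" line

-- ===== PORT A =====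
-- one iteration of A's loop body over state (in_section, section)
def pvAStep (ua : String) (st : Bool × List String) (line : String) : Bool × List String :=
  let ins := if pvIsUA line then pvMatches line ua else st.1
  let sec := if pvIsUA line && ins then [] else st.2
  (ins, if ins then sec ++ [line] else sec)

def extract_user_agent_section_py (content : String) (user_agent : String) : Option String :=
  let st := (pvLines content).foldl (pvAStep user_agent) (false, [])
  if st.2.isEmpty then none else some (PySem.Str.join "\n" st.2)

-- ===== PORT B =====
-- first loop of Source B: each User-agent line closes the current block and starts a new one
def pvBStep (st : List (List String) × List String) (line : String) : List (List String) × List String :=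
  if pvIsUA line then (st.1 ++ [st.2], [line]) else (st.1, st.2 ++ [line])

-- second loop of Source B: remember the join of the last block whose head line matches
def pvSelect (ua : String) (r : Option String) (b : List String) : Option String :=
  match b with
  | [] => r
  | h :: _ => if pvIsUA h && pvMatches h ua then some (PySem.Str.join "\n" b) else r

def extract_user_agent_section_py_alt (content : String) (user_agent : String) : Option String :=
  let st := (pvLines content).foldl pvBStep ([], [])
  (st.1 ++ [st.2]).foldl (pvSelect user_agent) none

-- ===== PRECONDITION & SPEC =====
def Spec_extract_user_agent_section_py (content : String) (user_agent : String) (out : Option String) : Prop := out = extract_user_agent_section_py_alt content user_agent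
instance (content : String) (user_agent : String) (out : Option String) : Decidable (Spec_extract_user_agent_section_py content user_agent out) := by unfold Spec_extract_user_agent_section_py; infer_instance

-- ===== CLAIM (what is proved, stated in full; the proofs are below) =====
def Claim_equal_extract_user_agent_section_py : Prop := ∀ (content : String) (user_agent : String), Dom_extract_user_agent_section_py content user_agent → Spec_extract_user_agent_section_py content user_agent (extract_user_agent_section_py content user_agent)

-- ===== LEMMAS AND PROOFS =====

-- a block matches iff it is nonempty and its head is a matching User-agent line
def pvMatchB (ua : String) (b : List String) : Bool :=
  match b with
  | [] => false
  | h :: _ => pvIsUA h && pvMatches h ua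

-- last matching block of a list of blocks
def pvLastM (ua : String) (bs : List (List String)) : Option (List String) :=
  bs.foldl (fun r b => if pvMatchB ua b then some b else r) none

-- invariant tying A's loop state to B's loop state
def pvInv (ua : String) (a : Bool × List String) (b : List (List String) × List String) : Prop :=
  a.1 = pvMatchB ua b.2 ∧
  a.2 = (if pvMatchB ua b.2 then b.2 else (pvLastM ua b.1).getD []) ∧
  (∀ s, pvLastM ua b.1 = some s → pvMatchB ua s = true)

theorem pvLastM_append (ua : String) (bs : List (List String)) (c : List String) :
    pvLastM ua (bs ++ [c]) = if pvMatchB ua c then some c else pvLastM ua bs := by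
  simp [pvLastM]

theorem pvLastM_snoc_spec (ua : String) (bs : List (List String)) (c : List String)
    (h3 : ∀ s, pvLastM ua bs = some s → pvMatchB ua s = true) :
    ∀ s, pvLastM ua (bs ++ [c]) = some s → pvMatchB ua s = true := by
  intro s hs
  rw [pvLastM_append] at hs
  by_cases hc : pvMatchB ua c = true
  · rw [if_pos hc] at hs; cases hs; exact hc
  · rw [if_neg hc] at hs; exact h3 s hs

theorem pvInv_step (ua : String) (a : Bool × List String) (b : List (List String) × List String)
    (l : String) (h : pvInv ua a b) : pvInv ua (pvAStep ua a l) (pvBStep b l) := by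
  obtain ⟨h1, h2, h3⟩ := h
  by_cases hua : pvIsUA l = true
  · have hA : pvAStep ua a l =
        (pvMatches l ua, if pvMatches l ua then [l] else a.2) := by
      by_cases hm : pvMatches l ua = true <;> simp [pvAStep, hua, hm]
    have hB : pvBStep b l = (b.1 ++ [b.2], [l]) := by simp [pvBStep, hua]
    have hmb : pvMatchB ua [l] = pvMatches l ua := by simp [pvMatchB, hua]
    rw [hA, hB]
    refine ⟨by simp [hmb], ?_, pvLastM_snoc_spec ua b.1 b.2 h3⟩
    simp only [hmb]
    by_cases hm : pvMatches l ua = true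
    · simp [hm]
    · simp only [hm, Bool.false_eq_true, if_false, pvLastM_append]
      rw [h2]
      by_cases hc : pvMatchB ua b.2 = true
      · simp [hc]
      · simp [hc]
  · have hA : pvAStep ua a l = (a.1, if a.1 then a.2 ++ [l] else a.2) := by
      simp [pvAStep, hua]
    have hB : pvBStep b l = (b.1, b.2 ++ [l]) := by simp [pvBStep, hua]
    have hb2 : pvMatchB ua (b.2 ++ [l]) = pvMatchB ua b.2 := by
      cases hc : b.2 with
      | nil => simp [pvMatchB, hua]
      | cons x xs => simp [pvMatchB]
    rw [hA, hB]
    refine ⟨by simp [hb2, h1], ?_, h3⟩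
    simp only [hb2]
    by_cases hc : pvMatchB ua b.2 = true
    · have ha1 : a.1 = true := by rw [h1]; exact hc
      have ha2 : a.2 = b.2 := by rw [h2, if_pos hc]
      simp [ha1, ha2, hc]
    · have ha1 : a.1 = false := by rw [h1]; simp [hc]
      have ha2 : a.2 = (pvLastM ua b.1).getD [] := by rw [h2, if_neg hc]
      simp [ha1, ha2, hc]

theorem pvInv_foldl (ua : String) (ls : List String) (a : Bool × List String)
    (b : List (List String) × List String) (h : pvInv ua a b) :
    pvInv ua (ls.foldl (pvAStep ua) a) (ls.foldl pvBStep b) := by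
  induction ls generalizing a b with
  | nil => exact h
  | cons l ls ih =>
    rw [List.foldl_cons, List.foldl_cons]
    exact ih _ _ (pvInv_step ua a b l h)

-- the selection fold computes the join of the last matching block
theorem pvSelect_foldl (ua : String) (bs : List (List String)) (o : Option (List String)) :
    bs.foldl (pvSelect ua) (o.map (PySem.Str.join "\n")) =
      (bs.foldl (fun r b => if pvMatchB ua b then some b else r) o).map (PySem.Str.join "\n") := by
  induction bs generalizing o with
  | nil => rfl
  | cons b bs ih =>
    have hstep : pvSelect ua (o.map (PySem.Str.join "\n")) b =
        (if pvMatchB ua b then some b else o).map (PySem.Str.join "\n") := by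
      cases b with
      | nil => simp [pvSelect, pvMatchB]
      | cons h t =>
        by_cases hm : (pvIsUA h && pvMatches h ua) = true
        · simp only [pvSelect, pvMatchB, hm, if_pos, Option.map_some]
        · simp only [pvSelect, pvMatchB, hm, Bool.false_eq_true, if_false]
    simp only [List.foldl_cons, hstep]
    exact ih _

theorem pvMatchB_ne_nil (ua : String) (b : List String) (h : pvMatchB ua b = true) : b ≠ [] := by
  intro hnil; rw [hnil] at h; simp [pvMatchB] at h

-- ===== VERDICT (by name: the statement is the Claim_ definition above) =====
theorem extract_user_agent_section_py_spec : Claim_equal_extract_user_agent_section_py := by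
  intro content user_agent _
  unfold Spec_extract_user_agent_section_py
  unfold extract_user_agent_section_py extract_user_agent_section_py_alt
  simp only []
  set ls := pvLines content with hls
  set a := ls.foldl (pvAStep user_agent) (false, []) with ha
  set b := ls.foldl pvBStep ([], []) with hb
  have hinv : pvInv user_agent a b := by
    apply pvInv_foldl
    exact ⟨rfl, rfl, fun s hs => by simp [pvLastM] at hs⟩
  obtain ⟨h1, h2, h3⟩ := hinv
  have hsel : (b.1 ++ [b.2]).foldl (pvSelect user_agent) none =
      (pvLastM user_agent (b.1 ++ [b.2])).map (PySem.Str.join "\n") := by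
    have := pvSelect_foldl user_agent (b.1 ++ [b.2]) none
    simpa [pvLastM] using this
  rw [hsel, pvLastM_append]
  by_cases hm : pvMatchB user_agent b.2 = true
  · have ha2 : a.2 = b.2 := by rw [h2, if_pos hm]
    have hne : b.2 ≠ [] := pvMatchB_ne_nil user_agent b.2 hm
    rw [if_pos hm, ha2]
    simp [hne]
  · have ha2 : a.2 = (pvLastM user_agent b.1).getD [] := by rw [h2, if_neg hm]
    rw [if_neg hm, ha2]
    cases hl : pvLastM user_agent b.1 with
    | none => simp
    | some s =>
      have hne : s ≠ [] := pvMatchB_ne_nil user_agent s (h3 s hl)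
      simp [hne]
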